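-- pv_equiv track=rewrite | github.com/Z-Sofiene/cryptography | py_codes/Classic_crypt_decrypt.py | CleNumerique
-- ===== SOURCE A (Python) =====
-- def CleNumerique(cle):
--     cle = cle.upper()
--     cle = cle.replace(" ", "")
--     cle2 = sorted(cle)
--     position = []
--     for char in cle:
--         position.append(cle2.index(char))
--         cle2[cle2.index(char)] = None
--     return position
-- ===== SOURCE B (Python) =====
-- def CleNumerique(cle):
--     s = cle.upper().replace(" ", "")
--     return [sum(d < c for d in s) + s[:i].count(c) for i, c in enumerate(s)]
-- ===== Notes on version B (the rewrite author's own statement) =====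
-- stated objective: simpler
-- what changed: Replaces the sort-then-destructively-search loop (sorted copy, repeated list.index, None overwrites) by a direct closed-form rank: each char's rank is the number of strictly smaller chars plus the number of equal chars before it, computed in one comprehension with no mutable state.
import Mathlib
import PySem

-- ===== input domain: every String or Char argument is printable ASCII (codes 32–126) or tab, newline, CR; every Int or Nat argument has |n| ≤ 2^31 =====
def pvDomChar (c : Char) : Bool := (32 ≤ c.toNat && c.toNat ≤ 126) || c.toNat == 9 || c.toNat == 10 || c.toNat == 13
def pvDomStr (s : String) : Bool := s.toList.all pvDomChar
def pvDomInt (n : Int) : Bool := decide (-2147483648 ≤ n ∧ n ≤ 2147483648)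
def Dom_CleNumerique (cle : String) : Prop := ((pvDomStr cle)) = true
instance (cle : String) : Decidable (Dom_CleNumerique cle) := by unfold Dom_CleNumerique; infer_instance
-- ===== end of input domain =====

-- B replaces A's sorted-copy + repeated destructive list.index search by a closed-form rank
-- (strictly-smaller count plus earlier-equal count) with no mutable state; objective: simpler.

-- ===== PORT A =====
-- A's loop: `cle2` is Python's sorted list whose entries are overwritten by None,
-- modelled as List (Option Char). The `none` branch of index? is Python's ValueError
-- (unreachable here: the searched char always occurs in cle2); the loop keeps state
-- unchanged there.
def CleNumeriqueLoop : List Char → List (Option Char) → List Int → List Int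
  | [], _, pos => pos
  | c :: rest, cle2, pos =>
    match PySem.List.index? cle2 (some c) with
    | some i => CleNumeriqueLoop rest (cle2.set i none) (pos ++ [(i : Int)])
    | none => CleNumeriqueLoop rest cle2 pos

def CleNumerique (cle : String) : List Int :=
  let cleU := PySem.Str.upper cle
  let cle1 := PySem.Str.replace cleU " " ""
  let cle2 : List (Option Char) := (PySem.List.sorted cle1.toList (fun x => x) false).map some
  CleNumeriqueLoop cle1.toList cle2 []

-- ===== PORT B =====
-- Source B: s = cle.upper().replace(" ", "")
--       [sum(d < c for d in s) + s[:i].count(c) for i, c in enumerate(s)]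
def CleNumerique_alt (cle : String) : List Int :=
  let s := (PySem.Str.replace (PySem.Str.upper cle) " " "").toList
  (PySem.List.enumerate s).map (fun p =>
    s.foldl (fun acc d => if d < p.2 then acc + 1 else acc) 0
      + ((PySem.List.count (PySem.List.slice s none (some p.1)) p.2 : Int)))

-- ===== PRECONDITION & SPEC =====
def Spec_CleNumerique (cle : String) (out : List Int) : Prop := out = CleNumerique_alt cle
instance (cle : String) (out : List Int) : Decidable (Spec_CleNumerique cle out) := by unfold Spec_CleNumerique; infer_instance

-- ===== CLAIM (what is proved, stated in full; the proofs are below) =====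
def Claim_equal_CleNumerique : Prop := ∀ (cle : String), Dom_CleNumerique cle → Spec_CleNumerique cle (CleNumerique cle)

-- ===== LEMMAS AND PROOFS =====

-- ghost state: pvMask s f = s with, for each char c, the first (f c) occurrences of c
-- replaced by none (A's consumed slots)
def pvMask : List Char → (Char → Nat) → List (Option Char)
  | [], _ => []
  | x :: xs, f => (if f x = 0 then some x else none) :: pvMask xs (fun d => if d = x then f d - 1 else f d)

-- the common value both programs compute: rank of c after the already-processed prefix `pre`
def pvSpecGo (l : List Char) : List Char → List Char → List Int
  | _, [] => []
  | pre, c :: rest =>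
    ((l.countP (fun d => decide (d < c)) + pre.count c : Nat) : Int) :: pvSpecGo l (pre ++ [c]) rest

theorem pvMask_zero (s : List Char) : pvMask s (fun _ => 0) = s.map some := by
  induction s with
  | nil => rfl
  | cons x xs ih =>
    simp only [pvMask, Nat.zero_sub]
    rw [show (fun d => if d = x then (0:Nat) else 0) = (fun _ => 0) from funext (fun d => by split <;> rfl)]
    simp [ih]

theorem pvCountP_lt_eq_zero {s : List Char} {c : Char}
    (h : ∀ y ∈ s, c ≤ y) : s.countP (fun d => decide (d < c)) = 0 := by
  rw [List.countP_eq_zero]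
  intro y hy
  simp only [decide_eq_true_eq, not_lt]
  exact h y hy

-- first remaining slot of c in the masked sorted list = (#smaller chars) + (#consumed c's)
theorem pvIndex_mask (s : List Char) (f : Char → Nat) (c : Char)
    (hs : s.Pairwise (· ≤ ·)) (hc : f c < s.count c) :
    PySem.List.index? (pvMask s f) (some c) =
      some (s.countP (fun d => decide (d < c)) + f c) := by
  induction s generalizing f with
  | nil => simp [List.count_nil] at hc
  | cons x xs ih =>
    rcases List.pairwise_cons.mp hs with ⟨hx, hxs⟩
    by_cases hxc : x = c
    · subst hxc
      have h0 : xs.countP (fun d => decide (d < x)) = 0 := pvCountP_lt_eq_zero hx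
      have hcp : (x :: xs).countP (fun d => decide (d < x)) = 0 := by
        simp [h0]
      rw [hcp]
      rcases Nat.eq_zero_or_pos (f x) with h | h
      · rw [pvMask, if_pos h, PySem.List.index?_cons_self]
        simp [h]
      · rw [pvMask, if_neg (Nat.ne_of_gt h), PySem.List.index?_cons_of_ne _ (by simp)]
        have hcnt : f x - 1 < xs.count x := by
          simp at hc; omega
        rw [ih (fun d => if d = x then f d - 1 else f d) hxs (by simpa using hcnt)]
        simp [h0]
        omega
    · have hcnt : f c < xs.count c := by
        simp [hxc] at hc
        omega
      have hmem : c ∈ xs := by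
        by_contra hm
        simp [List.count_eq_zero_of_not_mem hm] at hcnt
      have hlt : x < c := lt_of_le_of_ne (hx c hmem) hxc
      have hcx : ¬ c = x := fun h => hxc h.symm
      rw [pvMask, PySem.List.index?_cons_of_ne _ (by split <;> simp [hxc])]
      rw [ih (fun d => if d = x then f d - 1 else f d) hxs (by simpa [hcx] using hcnt)]
      simp [List.countP_cons, hlt, hcx]
      omega

-- overwriting that slot with None consumes one more c
theorem pvSet_mask (s : List Char) (f : Char → Nat) (c : Char)
    (hs : s.Pairwise (· ≤ ·)) (hc : f c < s.count c) :
    (pvMask s f).set (s.countP (fun d => decide (d < c)) + f c) none =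
      pvMask s (fun d => if d = c then f d + 1 else f d) := by
  induction s generalizing f with
  | nil => simp [List.count_nil] at hc
  | cons x xs ih =>
    rcases List.pairwise_cons.mp hs with ⟨hx, hxs⟩
    by_cases hxc : x = c
    · subst hxc
      have h0 : xs.countP (fun d => decide (d < x)) = 0 := pvCountP_lt_eq_zero hx
      have hcp : (x :: xs).countP (fun d => decide (d < x)) = 0 := by
        simp [h0]
      rw [hcp, Nat.zero_add]
      rcases Nat.eq_zero_or_pos (f x) with h | h
      · rw [pvMask, if_pos h, h, pvMask]
        rw [if_neg (by simp)]
        rw [List.set_cons_zero]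
        congr 1
        apply congrArg
        funext d
        by_cases hd : d = x <;> simp [hd, h]
      · obtain ⟨k, hk⟩ : ∃ k, f x = k + 1 := ⟨f x - 1, by omega⟩
        rw [pvMask, if_neg (Nat.ne_of_gt h), hk, pvMask, if_neg (by simp)]
        rw [List.set_cons_succ]
        congr 1
        have hcnt : (if x = x then f x - 1 else f x) < xs.count x := by
          simp at hc ⊢
          omega
        have h2 : (if x = x then f x - 1 else f x) = k := by simp [hk]
        have := ih (fun d => if d = x then f d - 1 else f d) hxs (by simpa using hcnt)
        rw [h0, Nat.zero_add] at this
        beta_reduce at this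
        rw [h2] at this
        rw [this]
        apply congrArg
        funext d
        by_cases hd : d = x <;> simp [hd, hk]
    · have hcnt : f c < xs.count c := by
        simp [hxc] at hc
        omega
      have hmem : c ∈ xs := by
        by_contra hm
        simp [List.count_eq_zero_of_not_mem hm] at hcnt
      have hlt : x < c := lt_of_le_of_ne (hx c hmem) hxc
      have hcx : ¬ c = x := fun h => hxc h.symm
      have hcp : (x :: xs).countP (fun d => decide (d < c)) =
          xs.countP (fun d => decide (d < c)) + 1 := by
        simp [List.countP_cons, hlt]
      rw [hcp, Nat.add_right_comm]
      rw [pvMask, List.set_cons_succ, pvMask]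
      congr 1
      · simp [hxc]
      · have hf : (fun d => if d = x then f d - 1 else f d) c < xs.count c := by
          simpa [hcx] using hcnt
        have := ih (fun d => if d = x then f d - 1 else f d) hxs hf
        beta_reduce at this
        simp only [hcx, if_false] at this
        rw [this]
        apply congrArg
        funext d
        by_cases hd : d = c
        · subst hd; simp [hcx]
        · by_cases hdx : d = x <;> simp [hd, hdx, hxc]

-- A's loop, started with `pre` already consumed, emits exactly the closed-form ranks
theorem pvLoop_cons (c : Char) (rest : List Char) (cle2 : List (Option Char))
    (pos : List Int) (i : Nat) (h : PySem.List.index? cle2 (some c) = some i) :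
    CleNumeriqueLoop (c :: rest) cle2 pos
      = CleNumeriqueLoop rest (cle2.set i none) (pos ++ [(i : Int)]) := by
  simp only [CleNumeriqueLoop]
  rw [h]

theorem pvLoop_spec (l : List Char) (rest : List Char) :
    ∀ (pre : List Char) (pos : List Int), (pre ++ rest).Perm l →
    CleNumeriqueLoop rest
      (pvMask (PySem.List.sorted l (fun x => x) false) (fun c => List.count c pre)) pos
      = pos ++ pvSpecGo l pre rest := by
  induction rest with
  | nil => intro pre pos _; simp [CleNumeriqueLoop, pvSpecGo]
  | cons c rest ih =>
    intro pre pos hperm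
    have hperm' : ((pre ++ [c]) ++ rest).Perm l := by
      simpa using hperm
    have hsp : (PySem.List.sorted l (fun x => x) false).Pairwise (· ≤ ·) := by
      simpa using PySem.List.sorted_pairwise (xs := l) (key := fun x => x)
    have hps : (PySem.List.sorted l (fun x => x) false).Perm l :=
      PySem.List.sorted_perm ..
    have hcnt : List.count c pre < (PySem.List.sorted l (fun x => x) false).count c := by
      rw [hps.count_eq]
      have := hperm.count_eq c
      simp [List.count_append] at this
      omega
    have hcp : (PySem.List.sorted l (fun x => x) false).countP (fun d => decide (d < c))
        = l.countP (fun d => decide (d < c)) := hps.countP_eq _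
    rw [pvLoop_cons c rest _ pos _ (pvIndex_mask _ _ c hsp hcnt)]
    rw [pvSet_mask _ _ c hsp hcnt]
    beta_reduce
    have hfun : (fun d => if d = c then List.count d pre + 1 else List.count d pre)
        = (fun d => List.count d (pre ++ [c])) := by
      funext d
      by_cases hd : d = c
      · simp [List.count_append, List.count_cons, hd]
      · simp [List.count_append, List.count_cons, hd, Ne.symm hd]
    rw [hfun, ih (pre ++ [c]) _ hperm']
    simp [pvSpecGo, hcp]

-- B's comprehension, from offset |pre|, emits the same closed-form ranks
theorem pvAlt_spec (l : List Char) (rest : List Char) :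
    ∀ (pre : List Char), pre ++ rest = l →
    (PySem.List.enumerate rest (pre.length : Int)).map (fun p =>
      l.foldl (fun acc d => if d < p.2 then acc + 1 else acc) 0
        + ((PySem.List.count (PySem.List.slice l none (some p.1)) p.2 : Int)))
      = pvSpecGo l pre rest := by
  induction rest with
  | nil => intro pre _; simp [PySem.List.enumerate_nil, pvSpecGo]
  | cons c rest ih =>
    intro pre h
    rw [PySem.List.enumerate_cons, List.map_cons]
    have hslice : PySem.List.slice l none (some ((pre.length : Nat) : Int))
        = l.take pre.length := PySem.List.slice_to_natCast ..
    have htake : l.take pre.length = pre := by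
      rw [← h, List.take_left]
    have hfold : l.foldl (fun acc d => if d < c then acc + 1 else acc) 0
        = (0 : Int) + (l.countP (fun d => decide (d < c)) : Int) :=
      PySem.List.foldl_ite_add_one _ _ _
    have hstep := ih (pre ++ [c]) (by simpa using h)
    rw [pvSpecGo]
    congr 1
    · rw [hfold, PySem.List.count_eq, hslice, htake]
      push_cast
      ring
    · have hlen : (((pre ++ [c]).length : Nat) : Int) = (pre.length : Int) + 1 := by
        push_cast [List.length_append, List.length_singleton]
        ring
      rw [← hstep, hlen]

-- ===== VERDICT (by name: the statement is the Claim_ definition above) =====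
theorem CleNumerique_spec : Claim_equal_CleNumerique := by
  intro cle _
  show CleNumerique cle = CleNumerique_alt cle
  unfold CleNumerique CleNumerique_alt
  have main : ∀ (l : List Char),
      CleNumeriqueLoop l ((PySem.List.sorted l (fun x => x) false).map some) [] =
      (PySem.List.enumerate l 0).map (fun p =>
        l.foldl (fun acc d => if d < p.2 then acc + 1 else acc) 0
          + ((PySem.List.count (PySem.List.slice l none (some p.1)) p.2 : Int))) := by
    intro l
    have hA := pvLoop_spec l l [] [] (by simp)
    rw [show (fun c => List.count c ([] : List Char)) = (fun _ : Char => 0) from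
        funext (fun c => by simp), pvMask_zero] at hA
    have hB := pvAlt_spec l l [] rfl
    simp only [List.length_nil, Nat.cast_zero] at hB
    rw [hA, ← hB]
    simp
  exact main _
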